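-- pv_equiv track=rewrite | github.com/kazuhiko1979/edabit | 094_very_hard_Diagonal_Rug.py | generate_rug
-- ===== SOURCE A (Python) =====
-- def generate_rug(n, direction):
--     rug = []
--     for i in range(n):
--         row = []
--         for j in range(n):
--             if direction == "left":
--                 value = abs(i - j)
--             else:
--                 value = abs(n - i - j - 1)
--             row.append(value)
--         rug.append(row)
--     return rug
-- ===== SOURCE B (Python) =====
-- def generate_rug(n, direction):
--     # Build the "left" pattern once, branch-free per cell; mirror rows for any other direction.
--     base = [[abs(i - j) for j in range(n)] for i in range(n)]
--     if direction == "left":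
--         return base
--     return [row[::-1] for row in base]
-- ===== Notes on version B (the rewrite author's own statement) =====
-- stated objective: simpler
-- what changed: B builds the branch-free base grid abs(i-j) with comprehensions and handles the direction once by reversing each row (column mirror), instead of testing the direction string in the inner loop for every cell.
import Mathlib
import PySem

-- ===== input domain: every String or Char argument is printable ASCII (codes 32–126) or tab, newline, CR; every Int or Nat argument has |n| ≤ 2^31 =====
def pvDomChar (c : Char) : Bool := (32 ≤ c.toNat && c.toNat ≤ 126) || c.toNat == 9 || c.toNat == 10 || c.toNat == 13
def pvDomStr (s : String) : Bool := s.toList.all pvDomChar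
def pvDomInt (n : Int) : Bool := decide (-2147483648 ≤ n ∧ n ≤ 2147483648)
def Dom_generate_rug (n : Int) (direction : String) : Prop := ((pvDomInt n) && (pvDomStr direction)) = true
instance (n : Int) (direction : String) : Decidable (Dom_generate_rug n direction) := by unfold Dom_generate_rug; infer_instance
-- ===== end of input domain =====

-- B builds the branch-free base grid |i-j| and mirrors each row once for non-"left" directions, instead of branching per cell.


-- ===== PORT A =====
def generate_rug (n : Int) (direction : String) : List (List Int) :=
  (PySem.List.pyRange 0 n 1).foldl (fun rug i =>
    rug ++ [(PySem.List.pyRange 0 n 1).foldl (fun row j =>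
      row ++ [if direction == "left" then |i - j| else |n - i - j - 1|]) []]) []

-- ===== PORT B =====
def generate_rug_alt (n : Int) (direction : String) : List (List Int) :=
  let base := (PySem.List.pyRange 0 n 1).map (fun i =>
    (PySem.List.pyRange 0 n 1).map (fun j => |i - j|))
  if direction == "left" then base else base.map List.reverse

-- ===== PRECONDITION & SPEC =====
def Spec_generate_rug (n : Int) (direction : String) (out : List (List Int)) : Prop := out = generate_rug_alt n direction
instance (n : Int) (direction : String) (out : List (List Int)) : Decidable (Spec_generate_rug n direction out) := by unfold Spec_generate_rug; infer_instance

-- ===== CLAIM (what is proved, stated in full; the proofs are below) =====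
def Claim_equal_generate_rug : Prop := ∀ (n : Int) (direction : String), Dom_generate_rug n direction → Spec_generate_rug n direction (generate_rug n direction)

-- ===== LEMMAS AND PROOFS =====

-- append-accumulator fold is map
theorem foldl_append_map {α β : Type} (f : α → β) (l : List α) (init : List β) :
    l.foldl (fun acc x => acc ++ [f x]) init = init ++ l.map f := by
  induction l generalizing init with
  | nil => simp
  | cons x xs ih => simp [List.foldl, ih]

-- reversing a map over range re-indexes from the far end
theorem reverse_map_range {α : Type} (g : Nat → α) (m : Nat) :
    ((List.range m).map g).reverse = (List.range m).map (fun k => g (m - 1 - k)) := by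
  apply List.ext_getElem
  · simp
  · intro k h1 h2
    simp only [List.length_map, List.length_range] at h1 h2
    simp only [List.getElem_reverse, List.getElem_map, List.getElem_range,
      List.length_map, List.length_range]

theorem row_reverse (n i : Int) (h : 0 ≤ n) :
    ((PySem.List.pyRange 0 n 1).map (fun j => |i - j|)).reverse
      = (PySem.List.pyRange 0 n 1).map (fun j => |n - i - j - 1|) := by
  rw [PySem.List.pyRange_one]
  simp only [List.map_map]
  rw [reverse_map_range]
  apply List.ext_getElem
  · simp
  · intro k h1 h2
    simp only [List.getElem_map, List.getElem_range, Function.comp_apply]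
    simp only [List.length_map, List.length_range] at h1
    have hk : k < (n - 0).toNat := h1
    have h1' : ((n : Int) - 0).toNat = n.toNat := by omega
    have hlt : (k : Int) < n := by omega
    have hcast : ((((n - 0).toNat - 1 - k : Nat)) : Int) = n - 1 - k := by omega
    have harg : i - (0 + (((n - 0).toNat - 1 - k : Nat) : Int)) = -(n - i - (0 + (k : Int)) - 1) := by omega
    rw [harg, abs_neg]

-- ===== VERDICT (by name: the statement is the Claim_ definition above) =====
theorem generate_rug_spec : Claim_equal_generate_rug := by
  intro n direction _
  unfold Spec_generate_rug generate_rug generate_rug_alt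
  by_cases hn : 0 ≤ n
  case neg =>
    rw [PySem.List.pyRange_one_eq_nil (by omega)]
    simp
  simp only [foldl_append_map, List.nil_append]
  by_cases hd : direction == "left"
  · simp only [hd, if_true]
  · have hd' : (direction == "left") = false := by simpa using hd
    simp only [hd', List.map_map, Bool.false_eq_true, if_false]
    apply List.map_congr_left
    intro i _
    simp only [Function.comp_apply]
    rw [row_reverse n i hn]
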